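-- pv_equiv track=rewrite | github.com/home-assistant/core | homeassistant/components/lutron_caseta/__init__.py | _construct_area_name_from_id
-- ===== SOURCE A (Python) =====
-- def _construct_area_name_from_id(
--     areas: dict[str, dict], area_id: str, labels: list[str]
-- ) -> str:
--     """Recursively construct the full area name including parent(s)."""
--     area = areas[area_id]
--     parent_area_id = area["parent_id"]
--     if parent_area_id is None:
--         # This is the root area, return last area
--         return " ".join(labels)
--
--     labels.insert(0, area["name"])
--     return _construct_area_name_from_id(areas, parent_area_id, labels)
-- ===== SOURCE B (Python) =====
-- def _construct_area_name_from_id(areas, area_id, labels):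
--     """Two staged passes: first walk the parent chain collecting the ids of the
--     non-root areas, then map those ids (root-most first) to names and join
--     with the given labels. Return value equals A's; unlike A, this does not
--     mutate `labels` in place."""
--     chain = []
--     while areas[area_id]["parent_id"] is not None:
--         chain.append(area_id)
--         area_id = areas[area_id]["parent_id"]
--     names = [areas[i]["name"] for i in reversed(chain)]
--     return " ".join(names + labels)
-- ===== Notes on version B (the rewrite author's own statement) =====
-- stated objective: alternative
-- what changed: Replaced the tail recursion with insert(0) into the caller's list by two staged passes: an iterative walk that records the chain of non-root area ids, then a comprehension mapping those ids (root-most first) to names, joined with labels; labels is not mutated.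
import Mathlib
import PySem

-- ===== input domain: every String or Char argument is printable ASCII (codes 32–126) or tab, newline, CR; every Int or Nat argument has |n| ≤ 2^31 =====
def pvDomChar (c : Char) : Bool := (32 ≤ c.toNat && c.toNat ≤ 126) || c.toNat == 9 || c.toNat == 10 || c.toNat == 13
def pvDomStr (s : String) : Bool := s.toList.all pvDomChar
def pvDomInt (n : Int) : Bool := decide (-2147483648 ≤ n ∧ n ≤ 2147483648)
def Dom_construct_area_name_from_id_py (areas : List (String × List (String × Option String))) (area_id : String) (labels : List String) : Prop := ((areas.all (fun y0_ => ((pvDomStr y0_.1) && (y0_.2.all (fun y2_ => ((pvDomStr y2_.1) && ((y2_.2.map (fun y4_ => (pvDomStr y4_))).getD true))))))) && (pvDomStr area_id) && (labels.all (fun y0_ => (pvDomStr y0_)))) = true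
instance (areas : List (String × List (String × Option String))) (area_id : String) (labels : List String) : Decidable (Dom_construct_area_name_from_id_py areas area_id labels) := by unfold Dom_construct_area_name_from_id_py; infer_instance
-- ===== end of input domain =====

-- B does two staged passes (collect the chain of non-root area ids, then map ids to names
-- and join with labels) instead of A's tail recursion with insert(0) into the caller's
-- list; return values agree (the equivalence is about the RETURN value only: A mutates
-- `labels` in place, B does not).

-- ===== PORT A =====
-- A's tail recursion; the Nat fuel only bounds the recursion depth (Python diverges /
-- raises on cycles and missing keys, which Pre_ excludes; fuel areas.length+1 always
-- suffices under Pre_). Error branches (KeyError / None name, excluded by Pre_) give "".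
def pvGoA (fuel : Nat) (areas : List (String × List (String × Option String))) (area_id : String) (labels : List String) : String :=
  match fuel with
  | 0 => ""
  | fuel + 1 =>
    match (PySem.Dict.mk areas).get? area_id with
    | none => ""
    | some area =>
      match (PySem.Dict.mk area).get? "parent_id" with
      | none => ""
      | some none => PySem.Str.join " " labels
      | some (some parent_area_id) =>
        match (PySem.Dict.mk area).get? "name" with
        | some (some nm) => pvGoA fuel areas parent_area_id (nm :: labels)
        | _ => ""

def construct_area_name_from_id_py (areas : List (String × List (String × Option String))) (area_id : String) (labels : List String) : String :=
  pvGoA (areas.length + 1) areas area_id labels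

-- ===== PORT B =====
-- Pass 1 of B: the while-loop collecting the ids of the non-root areas along the chain
-- (list built leaf-first, as Python's append does); none = a raising / fuel-exhausted run.
def pvChainB (fuel : Nat) (areas : List (String × List (String × Option String))) (area_id : String) : Option (List String) :=
  match fuel with
  | 0 => none
  | fuel + 1 =>
    match (PySem.Dict.mk areas).get? area_id with
    | none => none
    | some area =>
      match (PySem.Dict.mk area).get? "parent_id" with
      | none => none
      | some none => some []
      | some (some parent_area_id) => (pvChainB fuel areas parent_area_id).map (area_id :: ·)

-- Pass 2 of B: the comprehension [areas[i]["name"] for i in …]; none = a raising run.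
def pvNamesB (areas : List (String × List (String × Option String))) : List String → Option (List String)
  | [] => some []
  | i :: rest =>
    match (PySem.Dict.mk areas).get? i with
    | none => none
    | some area =>
      match (PySem.Dict.mk area).get? "name" with
      | some (some nm) => (pvNamesB areas rest).map (nm :: ·)
      | _ => none

def construct_area_name_from_id_py_alt (areas : List (String × List (String × Option String))) (area_id : String) (labels : List String) : String :=
  match pvChainB (areas.length + 1) areas area_id with
  | none => ""
  | some chain =>
    match pvNamesB areas chain.reverse with
    | none => ""
    | some names => PySem.Str.join " " (names ++ labels)

-- ===== PRECONDITION & SPEC =====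
-- The parent chain from area_id reaches a root (parent_id = None) within areas.length
-- steps, every visited area_id is a key of areas, every visited area has a "parent_id"
-- key, and every non-root visited area has a non-None "name": exactly where Python A
-- returns (otherwise it raises KeyError / TypeError or recurses forever on a cycle).
-- Reaching-the-root is an inherently inductive property of the input's parent links, so
-- it is stated as a Bool-valued check of the chain (it computes no output of either
-- port); the fuel areas.length+1 is exact: a chain that reaches a root without repeating
-- a key visits at most areas.length distinct keys, and a longer walk must revisit a key,
-- i.e. lie on a cycle, on which Python A never returns.
def pvChainOK (fuel : Nat) (areas : List (String × List (String × Option String))) (area_id : String) : Bool :=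
  match fuel with
  | 0 => false
  | fuel + 1 =>
    match (PySem.Dict.mk areas).get? area_id with
    | none => false
    | some area =>
      match (PySem.Dict.mk area).get? "parent_id" with
      | none => false
      | some none => true
      | some (some parent_area_id) =>
        match (PySem.Dict.mk area).get? "name" with
        | some (some _) => pvChainOK fuel areas parent_area_id
        | _ => false

def Pre_construct_area_name_from_id_py (areas : List (String × List (String × Option String))) (area_id : String) (labels : List String) : Prop :=
  pvChainOK (areas.length + 1) areas area_id = true

instance (areas : List (String × List (String × Option String))) (area_id : String) (labels : List String) : Decidable (Pre_construct_area_name_from_id_py areas area_id labels) := by unfold Pre_construct_area_name_from_id_py; infer_instance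

def pvWitness_construct_area_name_from_id_py : (List (String × List (String × Option String))) × String × List String :=
  ([("kitchen", [("parent_id", some "house"), ("name", some "Kitchen")]),
    ("house", [("parent_id", none), ("name", some "House")])], "kitchen", ["Light"])

def Spec_construct_area_name_from_id_py (areas : List (String × List (String × Option String))) (area_id : String) (labels : List String) (out : String) : Prop := out = construct_area_name_from_id_py_alt areas area_id labels
instance (areas : List (String × List (String × Option String))) (area_id : String) (labels : List String) (out : String) : Decidable (Spec_construct_area_name_from_id_py areas area_id labels out) := by unfold Spec_construct_area_name_from_id_py; infer_instance

-- ===== CLAIM (what is proved, stated in full; the proofs are below) =====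
def Claim_equal_construct_area_name_from_id_py : Prop := ∀ (areas : List (String × List (String × Option String))) (area_id : String) (labels : List String), Dom_construct_area_name_from_id_py areas area_id labels → Pre_construct_area_name_from_id_py areas area_id labels → Spec_construct_area_name_from_id_py areas area_id labels (construct_area_name_from_id_py areas area_id labels)

-- ===== LEMMAS AND PROOFS =====
theorem pvWitness_ok : Dom_construct_area_name_from_id_py (pvWitness_construct_area_name_from_id_py.1) (pvWitness_construct_area_name_from_id_py.2.1) (pvWitness_construct_area_name_from_id_py.2.2) ∧ Pre_construct_area_name_from_id_py (pvWitness_construct_area_name_from_id_py.1) (pvWitness_construct_area_name_from_id_py.2.1) (pvWitness_construct_area_name_from_id_py.2.2) := by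
  decide

theorem pvNamesB_append (areas : List (String × List (String × Option String))) (xs ys : List String) :
    pvNamesB areas (xs ++ ys)
      = match pvNamesB areas xs, pvNamesB areas ys with
        | some a, some b => some (a ++ b)
        | _, _ => none := by
  induction xs with
  | nil => simp [pvNamesB]; cases pvNamesB areas ys <;> simp
  | cons i rest ih =>
    simp only [List.cons_append, pvNamesB]
    rcases h1 : (PySem.Dict.mk areas).get? i with _ | area
    · simp
    rcases h2 : (PySem.Dict.mk area).get? "name" with _ | (_ | nm) <;> simp [h2, ih]
    cases pvNamesB areas rest <;> cases pvNamesB areas ys <;> simp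

-- main invariant: under pvChainOK, both passes of B succeed and A's accumulator run
-- equals the join of B's names with any labels
theorem pvGoA_eq (fuel : Nat) (areas : List (String × List (String × Option String))) (area_id : String)
    (h : pvChainOK fuel areas area_id = true) :
    ∃ ch ns, pvChainB fuel areas area_id = some ch ∧ pvNamesB areas ch.reverse = some ns ∧
      ∀ labels, pvGoA fuel areas area_id labels = PySem.Str.join " " (ns ++ labels) := by
  induction fuel generalizing area_id with
  | zero => simp [pvChainOK] at h
  | succ fuel ih =>
    simp only [pvChainOK] at h
    rcases h1 : (PySem.Dict.mk areas).get? area_id with _ | area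
    · simp [h1] at h
    simp only [h1] at h
    rcases h2 : (PySem.Dict.mk area).get? "parent_id" with _ | (_ | parent)
    · simp [h2] at h
    · refine ⟨[], [], ?_, ?_, ?_⟩ <;> simp [pvChainB, pvNamesB, pvGoA, h1, h2]
    simp only [h2] at h
    rcases h3 : (PySem.Dict.mk area).get? "name" with _ | (_ | nm)
    · simp [h3] at h
    · simp [h3] at h
    simp only [h3] at h
    obtain ⟨ch, ns, hch, hns, hgo⟩ := ih parent h
    refine ⟨area_id :: ch, ns ++ [nm], ?_, ?_, ?_⟩
    · simp [pvChainB, h1, h2, hch]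
    · simp [List.reverse_cons, pvNamesB_append, hns, pvNamesB, h1, h3]
    · intro labels
      simp [pvGoA, h1, h2, h3, hgo (nm :: labels)]

-- ===== VERDICT (by name: the statement is the Claim_ definition above) =====
theorem construct_area_name_from_id_py_spec : Claim_equal_construct_area_name_from_id_py := by
  intro areas area_id labels _ hpre
  obtain ⟨ch, ns, hch, hns, hgo⟩ := pvGoA_eq (areas.length + 1) areas area_id hpre
  unfold Spec_construct_area_name_from_id_py construct_area_name_from_id_py construct_area_name_from_id_py_alt
  simp [hch, hns, hgo labels]
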